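-- pv_equiv track=rewrite | github.com/mcjcode/number-theory | combinatorics.py | newtons_identity
-- ===== SOURCE A (Python) =====
-- def newtons_identity(ps):
--     """
--     :param ps: the values of the power symmetric polynomials
--     :return: the corresponding values of the elementary symmetric polynomials
--
--     Example:
--
--     x1, x2, x3 = 1, 2, 3
--     ps = [ x1**n + x2**n + x3**n for n in range(3)]
--     es = newtons_identities(ps)
--     assert es == [1, 6, 11, 6]
--
--     """
--     es = [1]
--     for j in range(1, len(ps)):
--         z = 0
--         sign = 1
--         for i in range(1, j+1):
--             z += sign*ps[i]*es[j-i]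
--             sign *= -1
--         es.append(z//j)
--     return es
-- ===== SOURCE B (Python) =====
-- def newtons_identity(ps):
--     # Scatter (push) formulation of Newton's identities: keep an array z of
--     # running partial Newton sums; each new elementary value is finalized by a
--     # single division and then pushed forward to all later sums, so no inner
--     # dot product is ever recomputed.
--     n = len(ps)
--     # z[t] starts out as the contribution of e0 = 1 to the t-th Newton sum
--     z = [p if t % 2 == 1 else -p for t, p in enumerate(ps)]
--     es = [1]
--     for j in range(1, n):
--         ej = z[j] // j
--         es.append(ej)
--         # push ej's contribution into every later partial sum
--         for t in range(j + 1, n):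
--             z[t] += (ps[t - j] if (t - j) % 2 == 1 else -ps[t - j]) * ej
--     return es
-- ===== Notes on version B (the rewrite author's own statement) =====
-- stated objective: alternative
-- what changed: B replaces A's per-step inner gather (recomputing an alternating dot product over all previous elementary values) with a scatter/push scheme: an array z of running partial Newton sums is initialized from ps, each new elementary value is finalized by one division z[j]//j, and its contribution is pushed forward into all later partial sums.
import Mathlib
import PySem

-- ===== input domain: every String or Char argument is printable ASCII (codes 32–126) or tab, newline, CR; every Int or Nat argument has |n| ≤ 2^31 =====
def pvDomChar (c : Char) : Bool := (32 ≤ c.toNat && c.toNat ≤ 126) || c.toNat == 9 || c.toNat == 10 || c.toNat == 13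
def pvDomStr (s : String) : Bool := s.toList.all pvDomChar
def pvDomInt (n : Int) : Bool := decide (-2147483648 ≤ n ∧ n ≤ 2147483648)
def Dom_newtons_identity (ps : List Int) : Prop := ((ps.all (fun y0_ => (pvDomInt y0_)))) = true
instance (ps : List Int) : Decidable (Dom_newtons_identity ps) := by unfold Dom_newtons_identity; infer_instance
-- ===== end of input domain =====

-- B replaces A's inner gather loop by a scatter/push scheme over an array of
-- running partial Newton sums (alternative decomposition, same cost).

-- ===== PORT A =====
-- indices i and j-i are always in range, so `.getD 0` never supplies its default
def newtons_identity (ps : List Int) : List Int :=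
  (PySem.List.pyRange 1 ps.length 1).foldl
    (fun es j =>
      let st := (PySem.List.pyRange 1 (j + 1) 1).foldl
        (fun (st : Int × Int) i =>
          (st.1 + st.2 * (PySem.List.pyGet? ps i).getD 0 * (PySem.List.pyGet? es (j - i)).getD 0,
           st.2 * (-1)))
        (0, 1)
      es ++ [PySem.Int.floordiv st.1 j])
    [1]

-- ===== PORT B =====
-- indices j, t and t-j are always in range (0 ≤ index < len), so `.getD 0`
-- never supplies its default and `z.set t.toNat` is exactly Python's z[t] = …
def newtons_identity_alt (ps : List Int) : List Int :=
  let z0 : List Int := (PySem.List.enumerate ps).map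
    (fun tp => if PySem.Int.mod tp.1 2 == 1 then tp.2 else -tp.2)
  let st := (PySem.List.pyRange 1 ps.length 1).foldl
    (fun (st : List Int × List Int) j =>
      let ej := PySem.Int.floordiv ((PySem.List.pyGet? st.2 j).getD 0) j
      let z := (PySem.List.pyRange (j + 1) ps.length 1).foldl
        (fun z t =>
          z.set t.toNat ((PySem.List.pyGet? z t).getD 0 +
            (if PySem.Int.mod (t - j) 2 == 1 then (PySem.List.pyGet? ps (t - j)).getD 0
             else -(PySem.List.pyGet? ps (t - j)).getD 0) * ej))
        st.2
      (st.1 ++ [ej], z))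
    ([1], z0)
  st.1

-- ===== PRECONDITION & SPEC =====
def Spec_newtons_identity (ps : List Int) (out : List Int) : Prop := out = newtons_identity_alt ps
instance (ps : List Int) (out : List Int) : Decidable (Spec_newtons_identity ps out) := by unfold Spec_newtons_identity; infer_instance

-- ===== CLAIM (what is proved, stated in full; the proofs are below) =====
def Claim_equal_newtons_identity : Prop := ∀ (ps : List Int), Dom_newtons_identity ps → Spec_newtons_identity ps (newtons_identity ps)

-- ===== LEMMAS AND PROOFS =====

/-- The alternating sign (-1)^(m-1) used for the m-th power sum. -/
def sgn (m : Nat) : Int := if m % 2 = 1 then 1 else -1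

theorem sgn_succ (m : Nat) : sgn (m + 1) = -sgn m := by
  rcases Nat.mod_two_eq_zero_or_one m with h | h <;>
    simp [sgn, Nat.add_mod, h]

/-- Reference for both loops: Σ s·(-1)^k · pt[k] · r[k], truncated at the shorter list. -/
def gatherRec : List Int → List Int → Int → Int
  | p :: pt, a :: rt, s => s * p * a + gatherRec pt rt (-s)
  | _, _, _ => 0

theorem gatherRec_nil_right (pt : List Int) (s : Int) : gatherRec pt [] s = 0 := by
  cases pt <;> rfl

/-- A's inner gather loop (from counter k+1 on) equals the reference gather on the
    dropped suffixes, for es of length j and valid ps indices. -/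
theorem innerA_gen (ps es : List Int) (j : Nat) (hj : es.length = j) (hlt : j < ps.length)
    (d : Nat) : ∀ (k : Nat) (z s : Int), k + d = j →
    ((PySem.List.pyRange ((k : Int) + 1) ((j : Int) + 1) 1).foldl
        (fun (st : Int × Int) i =>
          (st.1 + st.2 * (PySem.List.pyGet? ps i).getD 0 * (PySem.List.pyGet? es ((j : Int) - i)).getD 0,
           st.2 * (-1)))
        (z, s)).1
      = z + gatherRec (ps.drop (k + 1)) (es.reverse.drop k) s := by
  induction d with
  | zero =>
    intro k z s hk
    have hkj : k = j := by omega
    subst hkj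
    rw [PySem.List.pyRange_one_eq_nil (by omega)]
    have : es.reverse.drop k = [] := by
      apply List.drop_eq_nil_of_le; simp [hj]
    simp [this, gatherRec_nil_right]
  | succ d ih =>
    intro k z s hk
    have hklt : k < j := by omega
    rw [PySem.List.pyRange_one_cons (by omega : (k : Int) + 1 < (j : Int) + 1)]
    simp only [List.foldl_cons]
    have hps : (PySem.List.pyGet? ps ((k : Int) + 1)).getD 0 = ps[k + 1]'(by omega) := by
      have : ((k : Int) + 1) = ((k + 1 : Nat) : Int) := by push_cast; ring
      rw [this, PySem.List.pyGet?_natCast, List.getElem?_eq_getElem (by omega)]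
      rfl
    have hes : (PySem.List.pyGet? es ((j : Int) - ((k : Int) + 1))).getD 0
        = es[j - 1 - k]'(by omega) := by
      have : ((j : Int) - ((k : Int) + 1)) = ((j - 1 - k : Nat) : Int) := by omega
      rw [this, PySem.List.pyGet?_natCast, List.getElem?_eq_getElem (by omega)]
      rfl
    have hdropps : ps.drop (k + 1) = ps[k + 1]'(by omega) :: ps.drop (k + 2) := by
      rw [List.drop_eq_getElem_cons (by omega)]
    have hrevlen : k < es.reverse.length := by simp [hj]; omega
    have hdropes : es.reverse.drop k = es[j - 1 - k]'(by omega) :: es.reverse.drop (k + 1) := by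
      rw [List.drop_eq_getElem_cons hrevlen, List.getElem_reverse]
      congr 2
      omega
    have harg : ((k : Int) + 1) + 1 = ((k + 1 : Nat) : Int) + 1 := by push_cast; ring
    rw [harg] at *
    have ihk := ih (k + 1) (z + s * ps[k + 1]'(by omega) * es[j - 1 - k]'(by omega)) (s * (-1)) (by omega)
    rw [hps, hes, ihk, hdropps, hdropes]
    simp only [gatherRec]
    ring_nf

/-- B's scatter loop, pointwise: entries from index a on gain f t, earlier entries are kept. -/
theorem scatter_spec (f : Int → Int) (n : Nat) (d : Nat) : ∀ (a : Nat) (z : List Int),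
    z.length = n → n - a = d →
    ((PySem.List.pyRange (a : Int) (n : Int) 1).foldl
        (fun z t => z.set t.toNat ((PySem.List.pyGet? z t).getD 0 + f t)) z).length = n ∧
    ∀ i, i < n →
      ((PySem.List.pyRange (a : Int) (n : Int) 1).foldl
          (fun z t => z.set t.toNat ((PySem.List.pyGet? z t).getD 0 + f t)) z)[i]?
        = some (if a ≤ i then (z[i]?).getD 0 + f i else (z[i]?).getD 0) := by
  induction d with
  | zero =>
    intro a z hlen hd
    rw [PySem.List.pyRange_one_eq_nil (by omega)]
    refine ⟨hlen, ?_⟩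
    intro i hi
    have : ¬ a ≤ i := by omega
    simp [this, List.getElem?_eq_getElem (by omega : i < z.length)]
  | succ d ih =>
    intro a z hlen hd
    have halt : a < n := by omega
    rw [PySem.List.pyRange_one_cons (by exact_mod_cast halt)]
    simp only [List.foldl_cons]
    have hcast : ((a : Int) + 1) = ((a + 1 : Nat) : Int) := by push_cast; ring
    have htoNat : ((a : Int)).toNat = a := by omega
    set z' := z.set ((a : Int)).toNat ((PySem.List.pyGet? z (a : Int)).getD 0 + f (a : Int)) with hz'
    have hlen' : z'.length = n := by simp [hz', hlen]
    obtain ⟨hl, hp⟩ := ih (a + 1) z' hlen' (by omega)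
    rw [hcast]
    refine ⟨hl, ?_⟩
    intro i hi
    rw [hp i hi]
    have hz'i : z'[i]? = if i = a then some ((z[i]?).getD 0 + f i) else z[i]? := by
      by_cases hia : i = a
      · subst hia
        rw [if_pos rfl, hz', htoNat, List.getElem?_set_self (by omega),
          PySem.List.pyGet?_natCast]
      · rw [if_neg hia, hz', htoNat, List.getElem?_set_ne (Ne.symm hia)]
    rw [hz'i]
    by_cases hia : i = a
    · rw [if_neg (by omega : ¬ a + 1 ≤ i), if_pos hia, if_pos (by omega : a ≤ i),
        Option.getD_some]
    · by_cases hle : a + 1 ≤ i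
      · rw [if_neg hia, if_pos hle, if_pos (by omega : a ≤ i)]
      · rw [if_neg hia, if_neg hle, if_neg (by omega : ¬ a ≤ i)]

/-- B's initial z: entry t is sgn t · ps[t]. -/
theorem z0_spec (ps : List Int) (t : Nat) (ht : t < ps.length) :
    ((((PySem.List.enumerate ps).map
        (fun tp => if PySem.Int.mod tp.1 2 == 1 then tp.2 else -tp.2))[t]?).getD 0)
      = sgn t * ps[t] := by
  rw [List.getElem?_map, PySem.List.getElem?_enumerate, List.getElem?_eq_getElem ht]
  simp only [Option.map_some, Option.getD_some, zero_add]
  have : PySem.Int.mod (t : Int) 2 = ((t % 2 : Nat) : Int) := by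
    exact_mod_cast PySem.Int.mod_natCast t 2
  rw [this]
  rcases Nat.mod_two_eq_zero_or_one t with h | h <;> simp [h, sgn]

theorem gather_single (ps : List Int) (t : Nat) (ht : t < ps.length) (s : Int) :
    gatherRec (ps.drop t) [1] s = s * ps[t] := by
  rw [List.drop_eq_getElem_cons ht]
  simp only [gatherRec, gatherRec_nil_right]
  ring

/-- Coupling of A's outer loop with B's outer loop: the es parts agree, lengths are
    known, and B's z holds the partial gather for every not-yet-finalized index. -/
theorem couple (ps : List Int) : ∀ (m : Nat), 1 ≤ m → m ≤ ps.length →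
    (((PySem.List.pyRange 1 (m : Int) 1).foldl
      (fun (st : List Int × List Int) j =>
        let ej := PySem.Int.floordiv ((PySem.List.pyGet? st.2 j).getD 0) j
        let z := (PySem.List.pyRange (j + 1) ps.length 1).foldl
          (fun z t =>
            z.set t.toNat ((PySem.List.pyGet? z t).getD 0 +
              (if PySem.Int.mod (t - j) 2 == 1 then (PySem.List.pyGet? ps (t - j)).getD 0
               else -(PySem.List.pyGet? ps (t - j)).getD 0) * ej))
          st.2
        (st.1 ++ [ej], z))
      ([1], (PySem.List.enumerate ps).map
        (fun tp => if PySem.Int.mod tp.1 2 == 1 then tp.2 else -tp.2))).1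
      = (PySem.List.pyRange 1 (m : Int) 1).foldl
          (fun es j =>
            let st := (PySem.List.pyRange 1 (j + 1) 1).foldl
              (fun (st : Int × Int) i =>
                (st.1 + st.2 * (PySem.List.pyGet? ps i).getD 0 * (PySem.List.pyGet? es (j - i)).getD 0,
                 st.2 * (-1)))
              (0, 1)
            es ++ [PySem.Int.floordiv st.1 j])
          [1])
    ∧ ((PySem.List.pyRange 1 (m : Int) 1).foldl
          (fun es j =>
            let st := (PySem.List.pyRange 1 (j + 1) 1).foldl
              (fun (st : Int × Int) i =>
                (st.1 + st.2 * (PySem.List.pyGet? ps i).getD 0 * (PySem.List.pyGet? es (j - i)).getD 0,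
                 st.2 * (-1)))
              (0, 1)
            es ++ [PySem.Int.floordiv st.1 j])
          [1]).length = m
    ∧ (((PySem.List.pyRange 1 (m : Int) 1).foldl
      (fun (st : List Int × List Int) j =>
        let ej := PySem.Int.floordiv ((PySem.List.pyGet? st.2 j).getD 0) j
        let z := (PySem.List.pyRange (j + 1) ps.length 1).foldl
          (fun z t =>
            z.set t.toNat ((PySem.List.pyGet? z t).getD 0 +
              (if PySem.Int.mod (t - j) 2 == 1 then (PySem.List.pyGet? ps (t - j)).getD 0
               else -(PySem.List.pyGet? ps (t - j)).getD 0) * ej))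
          st.2
        (st.1 ++ [ej], z))
      ([1], (PySem.List.enumerate ps).map
        (fun tp => if PySem.Int.mod tp.1 2 == 1 then tp.2 else -tp.2))).2).length = ps.length
    ∧ ∀ t, m ≤ t → t < ps.length →
        (((((PySem.List.pyRange 1 (m : Int) 1).foldl
          (fun (st : List Int × List Int) j =>
            let ej := PySem.Int.floordiv ((PySem.List.pyGet? st.2 j).getD 0) j
            let z := (PySem.List.pyRange (j + 1) ps.length 1).foldl
              (fun z t =>
                z.set t.toNat ((PySem.List.pyGet? z t).getD 0 +
                  (if PySem.Int.mod (t - j) 2 == 1 then (PySem.List.pyGet? ps (t - j)).getD 0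
                   else -(PySem.List.pyGet? ps (t - j)).getD 0) * ej))
              st.2
            (st.1 ++ [ej], z))
          ([1], (PySem.List.enumerate ps).map
            (fun tp => if PySem.Int.mod tp.1 2 == 1 then tp.2 else -tp.2))).2)[t]?).getD 0)
          = gatherRec (ps.drop (t - m + 1))
              ((PySem.List.pyRange 1 (m : Int) 1).foldl
                (fun es j =>
                  let st := (PySem.List.pyRange 1 (j + 1) 1).foldl
                    (fun (st : Int × Int) i =>
                      (st.1 + st.2 * (PySem.List.pyGet? ps i).getD 0 * (PySem.List.pyGet? es (j - i)).getD 0,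
                       st.2 * (-1)))
                    (0, 1)
                  es ++ [PySem.Int.floordiv st.1 j])
                [1]).reverse (sgn (t - m + 1)) := by
  intro m
  induction m with
  | zero => intro h; exact absurd h (by omega)
  | succ m ih =>
    intro _ hle
    by_cases hm0 : m = 0
    · subst hm0
      rw [show (((0 + 1 : Nat)) : Int) = 1 by norm_num, PySem.List.pyRange_one_eq_nil (le_refl 1)]
      refine ⟨rfl, rfl, ?_, ?_⟩
      · simp [PySem.List.length_enumerate]
      · intro t ht1 ht2
        simp only [List.foldl_nil, List.reverse_singleton]
        have hidx : t - (0 + 1) + 1 = t := by omega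
        rw [hidx, z0_spec ps t ht2, gather_single ps t ht2]
    · obtain ⟨hBA, hAlen, hZlen, hinv⟩ := ih (by omega) (by omega)
      have hmlt : m < ps.length := by omega
      rw [show (((m + 1 : Nat)) : Int) = (m : Int) + 1 by push_cast; ring,
        PySem.List.pyRange_one_succ_right (by exact_mod_cast Nat.one_le_iff_ne_zero.mpr hm0)]
      simp only [List.foldl_append, List.foldl_cons, List.foldl_nil]
      set Am := ((PySem.List.pyRange 1 (m : Int) 1).foldl
        (fun es j =>
          let st := (PySem.List.pyRange 1 (j + 1) 1).foldl
            (fun (st : Int × Int) i =>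
              (st.1 + st.2 * (PySem.List.pyGet? ps i).getD 0 * (PySem.List.pyGet? es (j - i)).getD 0,
               st.2 * (-1)))
            (0, 1)
          es ++ [PySem.Int.floordiv st.1 j])
        [1]) with hAm
      set Bm := ((PySem.List.pyRange 1 (m : Int) 1).foldl
        (fun (st : List Int × List Int) j =>
          let ej := PySem.Int.floordiv ((PySem.List.pyGet? st.2 j).getD 0) j
          let z := (PySem.List.pyRange (j + 1) ps.length 1).foldl
            (fun z t =>
              z.set t.toNat ((PySem.List.pyGet? z t).getD 0 +
                (if PySem.Int.mod (t - j) 2 == 1 then (PySem.List.pyGet? ps (t - j)).getD 0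
                 else -(PySem.List.pyGet? ps (t - j)).getD 0) * ej))
            st.2
          (st.1 ++ [ej], z))
        ([1], (PySem.List.enumerate ps).map
          (fun tp => if PySem.Int.mod tp.1 2 == 1 then tp.2 else -tp.2))) with hBm
      -- the value B finalizes equals A's inner gather
      have hread : (PySem.List.pyGet? Bm.2 (m : Int)).getD 0
          = gatherRec (ps.drop 1) Am.reverse (sgn 1) := by
        rw [PySem.List.pyGet?_natCast]
        have := hinv m (le_refl m) hmlt
        rw [show m - m + 1 = 1 by omega] at this
        exact this
      have hinner := innerA_gen ps Am m hAlen hmlt m 0 0 1 (by omega)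
      rw [show ((0 : Nat) : Int) + 1 = (1 : Int) by norm_num] at hinner
      have hsgn1 : sgn 1 = 1 := by norm_num [sgn]
      have hej : PySem.Int.floordiv ((PySem.List.pyGet? Bm.2 (m : Int)).getD 0) (m : Int)
          = PySem.Int.floordiv
              (((PySem.List.pyRange 1 ((m : Int) + 1) 1).foldl
                (fun (st : Int × Int) i =>
                  (st.1 + st.2 * (PySem.List.pyGet? ps i).getD 0 * (PySem.List.pyGet? Am ((m : Int) - i)).getD 0,
                   st.2 * (-1)))
                (0, 1)).1) (m : Int) := by
        rw [hinner, hread, hsgn1]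
        simp
      -- the scatter fold, described pointwise
      set E := PySem.Int.floordiv ((PySem.List.pyGet? Bm.2 (m : Int)).getD 0) (m : Int) with hE
      obtain ⟨hslen, hspt⟩ := scatter_spec
        (fun t => (if PySem.Int.mod (t - (m : Int)) 2 == 1 then (PySem.List.pyGet? ps (t - (m : Int))).getD 0
                   else -(PySem.List.pyGet? ps (t - (m : Int))).getD 0) * E)
        ps.length (ps.length - (m + 1)) (m + 1) Bm.2 hZlen rfl
      rw [show (((m + 1 : Nat)) : Int) = (m : Int) + 1 by push_cast; ring] at hslen hspt
      refine ⟨?_, ?_, ?_, ?_⟩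
      · rw [hBA, hej]
      · simp [hAlen]
      · exact hslen
      · intro t ht1 ht2
        rw [hspt t ht2, if_pos ht1, Option.getD_some]
        have htm : ((t : Int) - (m : Int)) = ((t - m : Nat) : Int) := by omega
        have htmlt : t - m < ps.length := by omega
        have hmod : PySem.Int.mod (((t - m : Nat)) : Int) 2 = (((t - m) % 2 : Nat) : Int) := by
          exact_mod_cast PySem.Int.mod_natCast (t - m) 2
        have hf : (if PySem.Int.mod ((t : Int) - (m : Int)) 2 == 1
              then (PySem.List.pyGet? ps ((t : Int) - (m : Int))).getD 0
              else -(PySem.List.pyGet? ps ((t : Int) - (m : Int))).getD 0) * E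
            = sgn (t - m) * ps[t - m] * E := by
          rw [htm, PySem.List.pyGet?_natCast, List.getElem?_eq_getElem htmlt, Option.getD_some, hmod]
          rcases Nat.mod_two_eq_zero_or_one (t - m) with h | h <;> simp [h, sgn]
        rw [hf, hinv t (by omega) ht2]
        rw [show t - (m + 1) + 1 = t - m by omega]
        rw [List.reverse_append, List.reverse_singleton, List.singleton_append,
          List.drop_eq_getElem_cons htmlt]
        have hstep : t - m + 1 = (t - m) + 1 := rfl
        rw [hstep, sgn_succ]
        simp only [gatherRec]
        rw [← hej]
        ring

-- ===== VERDICT (by name: the statement is the Claim_ definition above) =====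
theorem newtons_identity_spec : Claim_equal_newtons_identity := by
  unfold Claim_equal_newtons_identity
  intro ps _
  unfold Spec_newtons_identity newtons_identity newtons_identity_alt
  by_cases hn : ps.length = 0
  · rw [hn]
    simp [PySem.List.pyRange_one_eq_nil]
  · obtain ⟨h1, _, _, _⟩ := couple ps ps.length (by omega) (le_refl _)
    simp only at h1
    exact h1.symm
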